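-- pv_equiv track=rewrite | github.com/OpenFUSIONToolkit/OpenFUSIONToolkit | src/utilities/basis_functions/lagrange.py | get_permute4
-- ===== SOURCE A (Python) =====
-- def get_permute4(order):
--     sets = []
--     for i in range(order+1):
--         for j in range(order+1):
--             if i+j > order:
--                 break
--             for k in range(order+1):
--                 if i+j+k > order:
--                     break
--                 l = order-i-j-k
--                 sets.append((i,j,k,l))
--     return sets
-- ===== SOURCE B (Python) =====
-- def get_permute4(order):
--     # Stars and bars: choose 3 bar positions 0 <= p0 < p1 < p2 < order+3;
--     # the four parts are the gaps between the bars.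
--     n = order + 3
--     return [(p0, p1 - p0 - 1, p2 - p1 - 1, order + 2 - p2)
--             for p0 in range(n)
--             for p1 in range(p0 + 1, n)
--             for p2 in range(p1 + 1, n)]
-- ===== Notes on version B (the rewrite author's own statement) =====
-- stated objective: alternative
-- what changed: Replaces the sum-bounded nested loops with breaks by a stars-and-bars enumeration: three strictly increasing bar positions in range(order+3) are iterated directly and the four parts are read off as the gaps, with no running-sum checks or break statements.
import Mathlib
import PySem

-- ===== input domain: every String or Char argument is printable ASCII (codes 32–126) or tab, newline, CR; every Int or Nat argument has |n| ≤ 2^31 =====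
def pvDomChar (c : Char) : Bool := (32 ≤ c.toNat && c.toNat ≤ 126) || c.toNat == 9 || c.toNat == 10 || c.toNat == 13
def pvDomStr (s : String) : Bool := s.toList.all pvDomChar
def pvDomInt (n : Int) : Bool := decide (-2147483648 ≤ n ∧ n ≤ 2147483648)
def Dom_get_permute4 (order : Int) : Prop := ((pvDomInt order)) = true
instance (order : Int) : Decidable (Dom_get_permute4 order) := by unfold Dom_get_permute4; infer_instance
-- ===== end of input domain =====

-- B replaces the sum-bounded nested loops with breaks by a stars-and-bars enumeration of
-- three increasing bar positions (alternative decomposition, same asymptotic cost).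


-- ===== PORT A =====
-- inner k-loop with its break (if i+j+k > order: break)
def pvLoopK (order i j : Int) : List Int → List (Int × Int × Int × Int) → List (Int × Int × Int × Int)
  | [], acc => acc
  | k :: ks, acc =>
      if order < i + j + k then acc
      else pvLoopK order i j ks (acc ++ [(i, j, k, order - i - j - k)])

-- middle j-loop with its break (if i+j > order: break)
def pvLoopJ (order i : Int) : List Int → List (Int × Int × Int × Int) → List (Int × Int × Int × Int)
  | [], acc => acc
  | j :: js, acc =>
      if order < i + j then acc
      else pvLoopJ order i js (pvLoopK order i j (PySem.List.pyRange 0 (order + 1) 1) acc)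

def get_permute4 (order : Int) : List (Int × Int × Int × Int) :=
  (PySem.List.pyRange 0 (order + 1) 1).foldl
    (fun acc i => pvLoopJ order i (PySem.List.pyRange 0 (order + 1) 1) acc) []

-- ===== PORT B =====
def get_permute4_alt (order : Int) : List (Int × Int × Int × Int) :=
  let n := order + 3
  (PySem.List.pyRange 0 n 1).foldl (fun acc p0 =>
    (PySem.List.pyRange (p0 + 1) n 1).foldl (fun acc p1 =>
      (PySem.List.pyRange (p1 + 1) n 1).foldl (fun acc p2 =>
        acc ++ [(p0, p1 - p0 - 1, p2 - p1 - 1, order + 2 - p2)]) acc) acc) []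

-- ===== PRECONDITION & SPEC =====
def Spec_get_permute4 (order : Int) (out : List (Int × Int × Int × Int)) : Prop := out = get_permute4_alt order
instance (order : Int) (out : List (Int × Int × Int × Int)) : Decidable (Spec_get_permute4 order out) := by unfold Spec_get_permute4; infer_instance

-- ===== CLAIM (what is proved, stated in full; the proofs are below) =====
def Claim_equal_get_permute4 : Prop := ∀ (order : Int), Dom_get_permute4 order → Spec_get_permute4 order (get_permute4 order)

-- ===== LEMMAS AND PROOFS =====

-- canonical form both ports are reduced to
def pvC3 (order i j : Int) : List (Int × Int × Int × Int) :=
  (PySem.List.pyRange 0 (order - i - j + 1) 1).map (fun k => (i, j, k, order - i - j - k))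

def pvC2 (order i : Int) : List (Int × Int × Int × Int) :=
  (PySem.List.pyRange 0 (order - i + 1) 1).flatMap (pvC3 order i)

def pvC (order : Int) : List (Int × Int × Int × Int) :=
  (PySem.List.pyRange 0 (order + 1) 1).flatMap (pvC2 order)

lemma pvFlatMap_congr {α β : Type} {l : List α} {f g : α → List β}
    (h : ∀ x ∈ l, f x = g x) : l.flatMap f = l.flatMap g := by
  simp only [List.flatMap]
  rw [List.map_congr_left h]

lemma pvRange_shift (a b c : Int) :
    PySem.List.pyRange (a + c) (b + c) 1 = (PySem.List.pyRange a b 1).map (· + c) := by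
  rw [PySem.List.pyRange_one, PySem.List.pyRange_one, List.map_map]
  have : b + c - (a + c) = b - a := by ring
  rw [this]
  exact List.map_congr_left (fun k _ => by simp; ring)

lemma pvLoopK_eq (order i j : Int) (hij : 0 ≤ i + j) :
    ∀ (n : ℕ) (a : Int) (acc : List (Int × Int × Int × Int)), (order + 1 - a).toNat = n →
      pvLoopK order i j (PySem.List.pyRange a (order + 1) 1) acc
        = acc ++ (PySem.List.pyRange a (order - i - j + 1) 1).map (fun k => (i, j, k, order - i - j - k)) := by
  intro n
  induction n with
  | zero =>
      intro a acc hn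
      rw [PySem.List.pyRange_one_eq_nil (by omega), PySem.List.pyRange_one_eq_nil (by omega)]
      simp [pvLoopK]
  | succ m ih =>
      intro a acc hn
      rw [PySem.List.pyRange_one_cons (by omega)]
      by_cases hbr : order < i + j + a
      · rw [PySem.List.pyRange_one_eq_nil (a := a) (b := order - i - j + 1) (by omega)]
        simp [pvLoopK, hbr]
      · rw [PySem.List.pyRange_one_cons (a := a) (b := order - i - j + 1) (by omega)]
        simp only [pvLoopK, if_neg hbr]
        rw [ih (a + 1) (acc ++ [(i, j, a, order - i - j - a)]) (by omega)]
        simp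

lemma pvLoopJ_eq (order i : Int) (hi : 0 ≤ i) :
    ∀ (n : ℕ) (a : Int) (acc : List (Int × Int × Int × Int)), (order + 1 - a).toNat = n → 0 ≤ a →
      pvLoopJ order i (PySem.List.pyRange a (order + 1) 1) acc
        = acc ++ (PySem.List.pyRange a (order - i + 1) 1).flatMap (pvC3 order i) := by
  intro n
  induction n with
  | zero =>
      intro a acc hn ha
      rw [PySem.List.pyRange_one_eq_nil (by omega), PySem.List.pyRange_one_eq_nil (by omega)]
      simp [pvLoopJ]
  | succ m ih =>
      intro a acc hn ha
      rw [PySem.List.pyRange_one_cons (by omega)]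
      by_cases hbr : order < i + a
      · rw [PySem.List.pyRange_one_eq_nil (a := a) (b := order - i + 1) (by omega)]
        simp [pvLoopJ, hbr]
      · rw [PySem.List.pyRange_one_cons (a := a) (b := order - i + 1) (by omega)]
        simp only [pvLoopJ, if_neg hbr]
        rw [pvLoopK_eq order i a (by omega) (order + 1 - 0).toNat 0 acc rfl]
        rw [ih (a + 1) _ (by omega) (by omega)]
        simp [pvC3]

lemma pvA_eq_C (order : Int) : get_permute4 order = pvC order := by
  unfold get_permute4 pvC
  rw [PySem.List.foldl_congr_mem _ _ (fun acc i => acc ++ pvC2 order i) []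
      (fun acc i hm => by
        have h := PySem.List.mem_pyRange_one.mp hm
        rw [pvLoopJ_eq order i h.1 (order + 1 - 0).toNat 0 acc rfl (le_refl 0)]
        rfl)]
  rw [PySem.List.foldl_append_eq_flatMap]
  simp

lemma pvB_eq_flat (order : Int) : get_permute4_alt order =
    (PySem.List.pyRange 0 (order + 3) 1).flatMap (fun p0 =>
      (PySem.List.pyRange (p0 + 1) (order + 3) 1).flatMap (fun p1 =>
        (PySem.List.pyRange (p1 + 1) (order + 3) 1).map (fun p2 =>
          (p0, p1 - p0 - 1, p2 - p1 - 1, order + 2 - p2)))) := by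
  unfold get_permute4_alt
  simp only [PySem.List.foldl_append_singleton_eq_map, PySem.List.foldl_append_eq_flatMap]
  simp

lemma pvB_eq_C (order : Int) : get_permute4_alt order = pvC order := by
  rw [pvB_eq_flat]
  by_cases hneg : order < 0
  · have hB : (PySem.List.pyRange 0 (order + 3) 1).flatMap (fun p0 =>
        (PySem.List.pyRange (p0 + 1) (order + 3) 1).flatMap (fun p1 =>
          (PySem.List.pyRange (p1 + 1) (order + 3) 1).map (fun p2 =>
            (p0, p1 - p0 - 1, p2 - p1 - 1, order + 2 - p2)))) = [] := by
      apply List.flatMap_eq_nil_iff.mpr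
      intro p0 hp0
      have h0 := PySem.List.mem_pyRange_one.mp hp0
      apply List.flatMap_eq_nil_iff.mpr
      intro p1 hp1
      have h1 := PySem.List.mem_pyRange_one.mp hp1
      rw [PySem.List.pyRange_one_eq_nil (a := p1 + 1) (b := order + 3) (by omega)]
      rfl
    have hC : pvC order = [] := by
      unfold pvC
      rw [PySem.List.pyRange_one_eq_nil (a := (0 : Int)) (b := order + 1) (by omega)]
      rfl
    rw [hB, hC]
  · unfold pvC
    rw [PySem.List.pyRange_one_append 0 (order + 1) (order + 3) (by omega) (by omega),
        List.flatMap_append]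
    have htail : (PySem.List.pyRange (order + 1) (order + 3) 1).flatMap (fun p0 =>
        (PySem.List.pyRange (p0 + 1) (order + 3) 1).flatMap (fun p1 =>
          (PySem.List.pyRange (p1 + 1) (order + 3) 1).map (fun p2 =>
            (p0, p1 - p0 - 1, p2 - p1 - 1, order + 2 - p2)))) = [] := by
      apply List.flatMap_eq_nil_iff.mpr
      intro p0 hp0
      have h0 := PySem.List.mem_pyRange_one.mp hp0
      apply List.flatMap_eq_nil_iff.mpr
      intro p1 hp1
      have h1 := PySem.List.mem_pyRange_one.mp hp1
      rw [PySem.List.pyRange_one_eq_nil (a := p1 + 1) (b := order + 3) (by omega)]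
      rfl
    rw [htail, List.append_nil]
    apply pvFlatMap_congr
    intro p0 hp0
    have h0 := PySem.List.mem_pyRange_one.mp hp0
    rw [PySem.List.pyRange_one_append (p0 + 1) (order + 2) (order + 3) (by omega) (by omega),
        List.flatMap_append]
    have htail2 : (PySem.List.pyRange (order + 2) (order + 3) 1).flatMap (fun p1 =>
        (PySem.List.pyRange (p1 + 1) (order + 3) 1).map (fun p2 =>
          (p0, p1 - p0 - 1, p2 - p1 - 1, order + 2 - p2))) = [] := by
      apply List.flatMap_eq_nil_iff.mpr
      intro p1 hp1
      have h1 := PySem.List.mem_pyRange_one.mp hp1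
      rw [PySem.List.pyRange_one_eq_nil (a := p1 + 1) (b := order + 3) (by omega)]
      rfl
    rw [htail2, List.append_nil]
    have hsh : PySem.List.pyRange (p0 + 1) (order + 2) 1
        = (PySem.List.pyRange 0 (order - p0 + 1) 1).map (· + (p0 + 1)) := by
      have h := pvRange_shift 0 (order - p0 + 1) (p0 + 1)
      rw [show (0 : Int) + (p0 + 1) = p0 + 1 by ring,
          show (order - p0 + 1) + (p0 + 1) = order + 2 by ring] at h
      exact h
    rw [hsh, List.flatMap_map]
    unfold pvC2
    apply pvFlatMap_congr
    intro j hj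
    have hsh2 : PySem.List.pyRange (j + (p0 + 1) + 1) (order + 3) 1
        = (PySem.List.pyRange 0 (order - p0 - j + 1) 1).map (· + (j + p0 + 2)) := by
      have h := pvRange_shift 0 (order - p0 - j + 1) (j + p0 + 2)
      rw [show (0 : Int) + (j + p0 + 2) = j + (p0 + 1) + 1 by ring,
          show (order - p0 - j + 1) + (j + p0 + 2) = order + 3 by ring] at h
      exact h
    rw [hsh2, List.map_map]
    unfold pvC3
    apply List.map_congr_left
    intro k hk
    simp [Prod.ext_iff]
    omega

theorem get_permute4_spec : Claim_equal_get_permute4 := by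
  intro order _
  unfold Spec_get_permute4
  rw [pvA_eq_C, pvB_eq_C]
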